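-- pv_equiv track=rewrite | github.com/loucksj/aoc2021 | scripts/day08.py | decode1478
-- ===== SOURCE A (Python) =====
-- def decode1478(signals) -> dict:
--     code = {}
--     for digit in signals:
--         if len(digit) == 2:
--             code[1] = digit
--             signals.remove(digit)
--             break
--     for digit in signals:
--         if len(digit) == 3:
--             code[7] = digit
--             signals.remove(digit)
--             break
--     for digit in signals:
--         if len(digit) == 4:
--             code[4] = digit
--             signals.remove(digit)
--             break
--     for digit in signals:
--         if len(digit) == 7:
--             code[8] = digit
--             signals.remove(digit)
--             break
--     return code
-- ===== SOURCE B (Python) =====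
-- def decode1478(signals) -> dict:
--     # Single table-driven pass over signals instead of four sequential scans;
--     # then one fixed-order assembly. Same in-place removals from signals as A.
--     table = {2: 1, 3: 7, 4: 4, 7: 8}
--     found = {}
--     for digit in signals:
--         n = len(digit)
--         if n in table and n not in found:
--             found[n] = digit
--     code = {table[n]: found[n] for n in (2, 3, 4, 7) if n in found}
--     for digit in found.values():
--         signals.remove(digit)
--     return code
-- ===== Notes on version B (the rewrite author's own statement) =====
-- stated objective: alternative
-- what changed: Replaced A's four sequential scan-and-remove loops (one per segment length) by a single table-driven pass that records the first signal of each wanted length in a dict, followed by a fixed-order assembly of the result; performs the same in-place removals from signals.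
import Mathlib
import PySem

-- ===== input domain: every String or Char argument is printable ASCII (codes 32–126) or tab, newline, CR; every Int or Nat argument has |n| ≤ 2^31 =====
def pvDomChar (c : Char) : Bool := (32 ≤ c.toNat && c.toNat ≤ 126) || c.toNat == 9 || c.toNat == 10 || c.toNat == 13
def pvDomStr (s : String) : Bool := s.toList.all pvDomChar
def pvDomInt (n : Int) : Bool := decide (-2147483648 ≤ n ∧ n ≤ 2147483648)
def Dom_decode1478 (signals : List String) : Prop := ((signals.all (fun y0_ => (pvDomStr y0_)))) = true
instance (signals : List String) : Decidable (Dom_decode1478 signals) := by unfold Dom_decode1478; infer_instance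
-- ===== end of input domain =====

-- B replaces A's four sequential scan-and-remove loops by one table-driven pass plus a
-- fixed-order assembly (objective: alternative decomposition). A and B both mutate the
-- Python argument `signals` in place (B removes the same four elements); the equivalence
-- proved here is about the RETURN value only (B's final removal loop does not affect it
-- and is not modelled).

-- ===== PORT A =====
-- each 'for digit in signals: if len(digit)==t: … break' is a find? of the first element
-- of length t; 'signals.remove(digit)' is PySem.List.remove? (getD = the loop's own
-- element is always present, so Python's remove cannot raise here)
def pvFindLen (t : Int) (sigs : List String) : Option String :=
  sigs.find? (fun d => PySem.Str.len d == t)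

def pvStepA (t : Int) (k : Int) (st : List (Int × String) × List String) :
    List (Int × String) × List String :=
  match pvFindLen t st.2 with
  | some d => (st.1 ++ [(k, d)], (PySem.List.remove? st.2 d).getD st.2)
  | none => st

def decode1478 (signals : List String) : List (Int × String) :=
  (pvStepA 7 8 (pvStepA 4 4 (pvStepA 3 7 (pvStepA 2 1 ([], signals))))).1

-- ===== PORT B =====
def pvTable : PySem.Dict Int Int := PySem.Dict.ofList [(2, 1), (3, 7), (4, 4), (7, 8)]

def pvFoundB (signals : List String) : PySem.Dict Int String :=
  signals.foldl
    (fun found d =>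
      let n := PySem.Str.len d
      if pvTable.contains n && !(found.contains n) then found.insert n d else found)
    PySem.Dict.empty

def decode1478_alt (signals : List String) : List (Int × String) :=
  let found := pvFoundB signals
  ([2, 3, 4, 7] : List Int).foldl
    (fun code n =>
      match found.get? n with
      | some d => code ++ [(pvTable.getD n 0, d)]
      | none => code)
    []

-- ===== PRECONDITION & SPEC =====
def Spec_decode1478 (signals : List String) (out : List (Int × String)) : Prop := out = decode1478_alt signals
instance (signals : List String) (out : List (Int × String)) : Decidable (Spec_decode1478 signals out) := by unfold Spec_decode1478; infer_instance

-- ===== CLAIM (what is proved, stated in full; the proofs are below) =====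
def Claim_equal_decode1478 : Prop := ∀ (signals : List String), Dom_decode1478 signals → Spec_decode1478 signals (decode1478 signals)

-- ===== LEMMAS AND PROOFS =====

-- removing one element that does not satisfy p leaves find? p unchanged
theorem pv_find?_erase {α : Type} [DecidableEq α] (p : α → Bool) (d : α) (hd : p d = false) :
    ∀ xs : List α, (xs.erase d).find? p = xs.find? p := by
  intro xs
  induction xs with
  | nil => rfl
  | cons x rest ih =>
    by_cases hx : x = d
    · subst hx
      simp [List.erase_cons_head, List.find?, hd]
    · rw [List.erase_cons_tail (by simp [hx])]
      by_cases hpx : p x = true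
      · simp [List.find?, hpx]
      · simp only [Bool.not_eq_true] at hpx
        simp [List.find?, hpx, ih]

-- A's later scans see the list with one element of a DIFFERENT length removed: same find?
theorem pvFindLen_after_remove (t t' : Int) (hne : t' ≠ t) (sigs : List String) (d : String)
    (hfind : pvFindLen t' sigs = some d) :
    pvFindLen t ((PySem.List.remove? sigs d).getD sigs) = pvFindLen t sigs := by
  have hmem : d ∈ sigs := List.mem_of_find?_eq_some hfind
  have hlen : PySem.Str.len d = t' := by
    have := List.find?_some hfind
    simpa using this
  rw [PySem.List.remove?_eq_some_erase sigs d hmem]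
  simp only [Option.getD_some]
  refine pv_find?_erase _ d ?_ sigs
  have hlen' : ((d.length : Int)) = t' := by simpa using hlen
  simp [hlen', hne]

-- characterisation of B's single pass: found.get? t is the first element of length t,
-- for any t the table knows, whatever was already found for OTHER keys
theorem pvFoundB_get (sigs : List String) (t : Int) (ht : pvTable.contains t = true) :
    ∀ found : PySem.Dict Int String,
      (sigs.foldl
        (fun found d =>
          let n := PySem.Str.len d
          if pvTable.contains n && !(found.contains n) then found.insert n d else found)
        found).get? t =
      match found.get? t with
      | some d => some d
      | none => pvFindLen t sigs := by
  induction sigs with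
  | nil =>
    intro found
    cases h : found.get? t <;> simp [pvFindLen, h]
  | cons d rest ih =>
    intro found
    simp only [List.foldl_cons]
    by_cases hn : (pvTable.contains (PySem.Str.len d) && !(found.contains (PySem.Str.len d))) = true
    · rw [if_pos hn]
      rw [ih]
      by_cases hteq : t = PySem.Str.len d
      · have hget : (found.insert (PySem.Str.len d) d).get? t = some d := by
          rw [hteq]; exact PySem.Dict.get?_insert_self found (PySem.Str.len d) d
        have hfoundt : found.get? t = none := by
          rw [hteq]
          have := (Bool.and_eq_true _ _).mp hn
          rcases this with ⟨_, h2⟩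
          rw [(PySem.Dict.get?_eq_none_iff_contains found (PySem.Str.len d))]
          simpa using h2
        rw [hget, hfoundt]
        simp [pvFindLen, List.find?, hteq]
      · rw [PySem.Dict.get?_insert_of_ne found d hteq]
        cases hft : found.get? t with
        | some v => simp
        | none =>
          have hdt : (PySem.Str.len d == t) = false := by
            simp; exact fun h => hteq h.symm
          have hdt' : (((d.length : Int)) == t) = false := by simpa using hdt
          simp [pvFindLen, List.find?, hdt']
    · rw [if_neg hn]
      rw [ih]
      cases hft : found.get? t with
      | some v => simp
      | none =>
        -- branch not taken and found lacks t ⇒ d does not have length t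
        have hdt : (PySem.Str.len d == t) = false := by
          by_contra hcon
          have heq : PySem.Str.len d = t := by simpa using (Bool.not_eq_false _).mp hcon
          have hcont : found.contains t = false := by
            have := (PySem.Dict.get?_eq_none_iff_contains found t).mp hft
            simpa using this
          rw [heq] at hn
          simp [ht, hcont] at hn
        have hdt' : (((d.length : Int)) == t) = false := by simpa using hdt
        simp [pvFindLen, List.find?, hdt']

-- specialisation: B's found, read at t, is A's first scan of the ORIGINAL list
theorem pvFoundB_get' (sigs : List String) (t : Int) (ht : pvTable.contains t = true) :
    (pvFoundB sigs).get? t = pvFindLen t sigs := by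
  have := pvFoundB_get sigs t ht PySem.Dict.empty
  simpa [pvFoundB] using this

-- unfold one B-assembly step: code gains the (key, digit) pair iff found has the length
def pvOptE (k : Int) (o : Option String) : List (Int × String) :=
  match o with
  | some d => [(k, d)]
  | none => []

theorem pvStepA_fst (t k : Int) (st : List (Int × String) × List String) :
    (pvStepA t k st).1 = st.1 ++ pvOptE k (pvFindLen t st.2) := by
  cases h : pvFindLen t st.2 <;> simp [pvStepA, h, pvOptE]

theorem pvStepA_snd (t k t' : Int) (hne : t ≠ t') (st : List (Int × String) × List String) :
    pvFindLen t' (pvStepA t k st).2 = pvFindLen t' st.2 := by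
  cases h : pvFindLen t st.2 with
  | none => simp [pvStepA, h]
  | some d =>
    simp only [pvStepA, h]
    exact pvFindLen_after_remove t' t hne st.2 d h

theorem pvStepB (found : PySem.Dict Int String) (code : List (Int × String)) (n : Int) :
    (match found.get? n with
      | some d => code ++ [(pvTable.getD n 0, d)]
      | none => code) = code ++ pvOptE (pvTable.getD n 0) (found.get? n) := by
  cases h : found.get? n <;> simp [pvOptE]

-- ===== VERDICT (by name: the statement is the Claim_ definition above) =====
theorem decode1478_spec : Claim_equal_decode1478 := by
  intro signals _
  unfold Spec_decode1478
  have h2 : (pvFoundB signals).get? 2 = pvFindLen 2 signals := pvFoundB_get' signals 2 (by decide)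
  have h3 : (pvFoundB signals).get? 3 = pvFindLen 3 signals := pvFoundB_get' signals 3 (by decide)
  have h4 : (pvFoundB signals).get? 4 = pvFindLen 4 signals := pvFoundB_get' signals 4 (by decide)
  have h7 : (pvFoundB signals).get? 7 = pvFindLen 7 signals := pvFoundB_get' signals 7 (by decide)
  -- B to canonical form
  have hb : decode1478_alt signals =
      (((([] : List (Int × String)) ++ pvOptE 1 (pvFindLen 2 signals))
        ++ pvOptE 7 (pvFindLen 3 signals))
        ++ pvOptE 4 (pvFindLen 4 signals))
        ++ pvOptE 8 (pvFindLen 7 signals) := by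
    unfold decode1478_alt
    simp only [List.foldl_cons, List.foldl_nil, pvStepB, h2, h3, h4, h7]
    rw [show pvTable.getD 2 0 = 1 from by decide, show pvTable.getD 3 0 = 7 from by decide,
        show pvTable.getD 4 0 = 4 from by decide, show pvTable.getD 7 0 = 8 from by decide]
  -- A to the same canonical form, peeling the four blocks right to left
  have ha : decode1478 signals =
      (((([] : List (Int × String)) ++ pvOptE 1 (pvFindLen 2 signals))
        ++ pvOptE 7 (pvFindLen 3 signals))
        ++ pvOptE 4 (pvFindLen 4 signals))
        ++ pvOptE 8 (pvFindLen 7 signals) := by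
    unfold decode1478
    rw [pvStepA_fst 7 8, pvStepA_fst 4 4, pvStepA_fst 3 7, pvStepA_fst 2 1,
        pvStepA_snd 4 4 7 (by decide), pvStepA_snd 3 7 7 (by decide), pvStepA_snd 2 1 7 (by decide),
        pvStepA_snd 3 7 4 (by decide), pvStepA_snd 2 1 4 (by decide),
        pvStepA_snd 2 1 3 (by decide)]
  rw [ha, hb]
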